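-- pv_equiv track=rewrite | github.com/Curtis-Jiang/IoT | SoundCommunication-main/utils/signal_utils.py | output_packed_list
-- ===== SOURCE A (Python) =====
-- def output_packed_bits(data: list) -> int:
--     res = 0
--     for i in range(len(data)):
--         res = res * 2 + data[i]
--     return res
--
-- def output_packed_list(data: list, bits: int) -> list:
--     assert (
--         len(data) % bits == 0
--     ), f"len(data) = {len(data)}, bits = {bits}, len(data) % bits = {len(data) % bits} != 0"
--     res = []
--     for i in range(0, len(data), bits):
--         res.append(output_packed_bits(data[i : i + bits]))
--     return res
-- ===== SOURCE B (Python) =====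
-- def output_packed_list(data: list, bits: int) -> list:
--     assert (
--         len(data) % bits == 0
--     ), f"len(data) = {len(data)}, bits = {bits}, len(data) % bits = {len(data) % bits} != 0"
--     res = []
--     cur = 0
--     cnt = 0
--     for x in data:
--         cur = cur * 2 + x
--         cnt += 1
--         if cnt == bits:
--             res.append(cur)
--             cur = 0
--             cnt = 0
--     return res
-- ===== Notes on version B (the rewrite author's own statement) =====
-- stated objective: simpler
-- what changed: Replaces the per-chunk slicing plus helper function with a single pass over data that keeps a running Horner accumulator and a group counter, appending and resetting each time the counter reaches bits; no helper, no slices, no index arithmetic.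
import Mathlib
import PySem

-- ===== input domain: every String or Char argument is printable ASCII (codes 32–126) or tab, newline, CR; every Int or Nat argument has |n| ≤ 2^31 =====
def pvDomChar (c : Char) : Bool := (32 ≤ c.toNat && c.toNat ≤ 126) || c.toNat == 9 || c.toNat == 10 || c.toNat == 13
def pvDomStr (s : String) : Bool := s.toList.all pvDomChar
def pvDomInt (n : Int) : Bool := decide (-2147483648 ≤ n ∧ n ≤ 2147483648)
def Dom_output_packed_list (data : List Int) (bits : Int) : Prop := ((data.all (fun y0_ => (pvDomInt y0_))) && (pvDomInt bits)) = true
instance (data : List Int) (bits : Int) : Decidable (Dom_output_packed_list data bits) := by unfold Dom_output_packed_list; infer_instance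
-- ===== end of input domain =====

-- B replaces the slice-per-chunk helper with one pass over data keeping a Horner
-- accumulator and a group counter (objective: simpler).


-- ===== PORT A =====
def output_packed_bits (data : List Int) : Int :=
  (PySem.List.pyRange 0 (data.length : Int) 1).foldl
    (fun res i => res * 2 + PySem.List.pyGetD data i 0) 0

def output_packed_list (data : List Int) (bits : Int) : List Int :=
  (PySem.List.pyRange 0 (data.length : Int) bits).foldl
    (fun res i => res ++ [output_packed_bits (PySem.List.slice data (some i) (some (i + bits)))]) []

-- ===== PORT B =====
def packStep (bits : Int) (s : List Int × Int × Int) (x : Int) : List Int × Int × Int :=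
  let cur := s.2.1 * 2 + x
  let cnt := s.2.2 + 1
  if cnt = bits then (s.1 ++ [cur], 0, 0) else (s.1, cur, cnt)

def output_packed_list_alt (data : List Int) (bits : Int) : List Int :=
  (data.foldl (packStep bits) ([], 0, 0)).1

-- ===== PRECONDITION & SPEC =====
-- Pre_ excludes bits = 0 (the assert's 'len(data) % bits' raises ZeroDivisionError) and
-- inputs where len(data) % bits ≠ 0 (the assert raises AssertionError).
def Pre_output_packed_list (data : List Int) (bits : Int) : Prop :=
  bits ≠ 0 ∧ PySem.Int.mod (data.length : Int) bits = 0
instance (data : List Int) (bits : Int) : Decidable (Pre_output_packed_list data bits) := by unfold Pre_output_packed_list; infer_instance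
def pvWitness_output_packed_list : List Int × Int := ([1, 0, 1, 1], 2)

def Spec_output_packed_list (data : List Int) (bits : Int) (out : List Int) : Prop := out = output_packed_list_alt data bits
instance (data : List Int) (bits : Int) (out : List Int) : Decidable (Spec_output_packed_list data bits out) := by unfold Spec_output_packed_list; infer_instance

-- ===== CLAIM (what is proved, stated in full; the proofs are below) =====
def Claim_equal_output_packed_list : Prop := ∀ (data : List Int) (bits : Int), Dom_output_packed_list data bits → Pre_output_packed_list data bits → Spec_output_packed_list data bits (output_packed_list data bits)

-- ===== LEMMAS AND PROOFS =====

-- packing a chunk by Horner's rule, as both sides compute it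
def hornerAcc (cur : Int) (c : List Int) : Int := c.foldl (fun r x => r * 2 + x) cur

theorem output_packed_bits_eq (c : List Int) : output_packed_bits c = hornerAcc 0 c := by
  unfold output_packed_bits hornerAcc
  exact PySem.List.foldl_pyRange_zero_pyGetD' c 0 _ 0

-- reference value both ports are reduced to (b = bits.toNat chunks)
def packRef (data : List Int) (b : Nat) (m : Nat) : List Int :=
  (List.range m).map (fun k => hornerAcc 0 ((data.drop (k * b)).take b))

theorem pyRange_neg_nil (n s : Int) (hs : s < 0) (hn : 0 ≤ n) :
    PySem.List.pyRange 0 n s = [] := by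
  unfold PySem.List.pyRange
  split_ifs <;> first | rfl | omega

-- B never appends when bits < 0 (the counter stays nonnegative)
theorem alt_neg_fst (bits : Int) (hb : bits < 0) :
    ∀ (c : List Int) (res : List Int) (cur cnt : Int), 0 ≤ cnt →
      (c.foldl (packStep bits) (res, cur, cnt)).1 = res := by
  intro c
  induction c with
  | nil => intro res cur cnt _; rfl
  | cons x cs ih =>
    intro res cur cnt hcnt
    simp only [List.foldl_cons, packStep]
    rw [if_neg (by omega)]
    exact ih res _ _ (by omega)

-- B on one full chunk of length bits (bits > 0): append the Horner value, reset
theorem alt_chunk (bits : Int) (_hb : 0 < bits) :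
    ∀ (c : List Int) (res : List Int) (cur cnt : Int), 0 ≤ cnt →
      cnt + (c.length : Int) = bits → c ≠ [] →
      c.foldl (packStep bits) (res, cur, cnt) = (res ++ [hornerAcc cur c], 0, 0) := by
  intro c
  induction c with
  | nil => intro _ _ _ _ _ h; exact absurd rfl h
  | cons x cs ih =>
    intro res cur cnt hcnt hlen _
    simp only [List.foldl_cons, packStep]
    by_cases hcs : cs = []
    · subst hcs
      simp only [List.length_cons, List.length_nil] at hlen
      rw [if_pos (by omega)]
      simp [hornerAcc]
    · have hlcs : 0 < (cs.length : Int) := by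
        have := List.length_pos_iff.mpr hcs
        omega
      have hlen' : cnt + 1 + (cs.length : Int) = bits := by
        simp only [List.length_cons] at hlen; push_cast at hlen ⊢; omega
      rw [if_neg (by omega)]
      have := ih res (cur * 2 + x) (cnt + 1) (by omega) (by omega) hcs
      rw [this]
      rfl

-- B over m full chunks
theorem alt_eq_packRef (bits : Int) (hb : 0 < bits) :
    ∀ (m : Nat) (data : List Int) (res : List Int),
      data.length = m * bits.toNat →
      (data.foldl (packStep bits) (res, 0, 0)).1 = res ++ packRef data bits.toNat m := by
  intro m
  induction m with
  | zero =>
    intro data res hlen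
    have : data = [] := List.eq_nil_of_length_eq_zero (by simpa using hlen)
    subst this
    simp [packRef]
  | succ m ih =>
    intro data res hlen
    have hble : bits.toNat ≤ data.length := by
      rw [hlen]; nlinarith [Nat.succ_mul m bits.toNat]
    have hsplit : data = data.take bits.toNat ++ data.drop bits.toNat :=
      (List.take_append_drop _ _).symm
    conv_lhs => rw [hsplit]
    rw [List.foldl_append]
    have hlt : (data.take bits.toNat).length = bits.toNat := by
      simp [Nat.min_eq_left hble]
    rw [alt_chunk bits hb (data.take bits.toNat) res 0 0 le_rfl
      (by rw [hlt]; omega)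
      (List.ne_nil_of_length_pos (by rw [hlt]; omega))]
    rw [ih (data.drop bits.toNat) _ (by simp only [List.length_drop, hlen, Nat.succ_mul]; omega)]
    simp only [hornerAcc, packRef, List.append_assoc, List.append_cancel_left_eq]
    rw [List.range_succ_eq_map, List.map_cons]
    simp only [Nat.zero_mul, List.drop_zero, List.map_map]
    rw [List.singleton_append]
    congr 1
    refine List.map_congr_left fun k _ => ?_
    simp only [Function.comp]
    rw [List.drop_drop]
    congr 2
    rw [Nat.succ_mul, Nat.add_comm]

-- fold-append is map
theorem foldl_append_singleton {α β : Type} (f : α → β) :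
    ∀ (l : List α) (res : List β),
      l.foldl (fun r i => r ++ [f i]) res = res ++ l.map f := by
  intro l
  induction l with
  | nil => intro res; simp
  | cons x xs ih => intro res; simp [ih]

-- A over m full chunks
theorem a_eq_packRef (bits : Int) (hb : 0 < bits) (m : Nat) (data : List Int)
    (hlen : data.length = m * bits.toNat) :
    output_packed_list data bits = packRef data bits.toNat m := by
  unfold output_packed_list
  have hrange : PySem.List.pyRange 0 (data.length : Int) bits =
      (List.range m).map (fun k : Nat => (0 : Int) + bits * (k : Int)) := by
    rw [PySem.List.pyRange_of_pos 0 (data.length : Int) hb]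
    congr 1
    by_cases hm : m = 0
    · subst hm
      simp at hlen
      rw [if_neg (by simp [hlen])]
    · rw [if_pos (by
        have : 0 < m * bits.toNat := Nat.mul_pos (Nat.pos_of_ne_zero hm) (by omega)
        rw [hlen]; exact_mod_cast this)]
      have hbn : ((bits.toNat : Int)) = bits := by omega
      have hlenI : ((data.length : Int)) = (m : Int) * bits := by
        rw [hlen]; push_cast; rw [hbn]
      have hdiv : ((data.length : Int) - 0 + bits - 1) / bits = (m : Int) := by
        rw [hlenI, show (m : Int) * bits - 0 + bits - 1 = (bits - 1) + bits * m by ring]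
        rw [Int.add_mul_ediv_left _ _ (by omega : bits ≠ 0)]
        rw [Int.ediv_eq_zero_of_lt (by omega) (by omega)]
        simp
      rw [hdiv, Int.toNat_natCast]
  rw [hrange, foldl_append_singleton]
  simp only [List.nil_append, packRef]
  rw [List.map_map]
  refine List.map_congr_left fun k _ => ?_
  simp only [Function.comp]
  rw [output_packed_bits_eq]
  congr 1
  have hbn : ((bits.toNat : Nat) : Int) = bits := by omega
  have h1 : (0 : Int) + bits * k = ((k * bits.toNat : Nat) : Int) := by
    push_cast; rw [hbn]; ring
  rw [h1, show bits = ((bits.toNat : Nat) : Int) from hbn.symm,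
    PySem.List.slice_natCast_add]
  simp only [Int.toNat_natCast]

-- ===== VERDICT (by name: the statement is the Claim_ definition above) =====
theorem output_packed_list_spec : Claim_equal_output_packed_list := by
  intro data bits _ hpre
  obtain ⟨hb0, hmod⟩ := hpre
  unfold Spec_output_packed_list
  rcases lt_or_gt_of_ne hb0 with hneg | hpos
  · -- bits < 0: A's range is empty; B never reaches the counter
    unfold output_packed_list output_packed_list_alt
    rw [pyRange_neg_nil _ _ hneg (by positivity)]
    rw [alt_neg_fst bits hneg data [] 0 0 le_rfl]
    rfl
  · -- bits > 0: both equal packRef on m = len / bits chunks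
    have hdvd : bits ∣ (data.length : Int) := (PySem.Int.mod_eq_zero_iff_dvd _ _).mp hmod
    obtain ⟨m, hm⟩ := hdvd
    have hm0 : 0 ≤ m := by nlinarith [Int.natCast_nonneg data.length]
    have hlen : data.length = m.toNat * bits.toNat := by
      have : (data.length : Int) = (m.toNat : Int) * (bits.toNat : Int) := by
        rw [hm]; rw [Int.toNat_of_nonneg hm0, Int.toNat_of_nonneg (le_of_lt hpos)]; ring
      exact_mod_cast this
    rw [a_eq_packRef bits hpos m.toNat data hlen]
    rw [output_packed_list_alt, alt_eq_packRef bits hpos m.toNat data [] hlen]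
    rfl
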